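-- pv_equiv track=rewrite | github.com/pypi-data/pypi-code-32 | beat.backend.python/beat.backend.python-1.6.0.zip/beat/backend/python/data.py | mixDataIndices
-- ===== SOURCE A (Python) =====
-- def mixDataIndices(list_of_data_indices):
--     """Given a collection of lists of data indices (belonging to separate
--     but synchronized files/inputs), returns the most granular list of
--     indices that span all the data
--
--     For example, the mix of
--
--       [(0, 2), (3, 4)]
--
--     and
--
--       [(0, 4)]
--
--     is:
--
--       [(0, 2), (3, 4)]
--
--
--     The mix of
--
--       [(0, 2), (3, 4)]
--
--     and
--
--       [(0, 1), (2, 3), (4, 4)]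
--
--     is:
--
--       [(0, 1), (2, 2), (3, 3), (4, 4)]
--
--     """
--
--     start = max([ x[0][0] for x in list_of_data_indices ])
--     end = min([ x[-1][1] for x in list_of_data_indices ])
--
--     result = []
--     current_start = start
--
--     for index in range(start, end + 1):
--         done = False
--
--         for l in list_of_data_indices:
--             for indices in l:
--                 if indices[1] == index:
--                     result.append( (current_start, index) )
--                     current_start = index + 1
--                     done = True
--                     break
--
--             if done:
--                 break
--
--     return result
-- ===== SOURCE B (Python) =====
-- def mixDataIndices(list_of_data_indices):
--     # single pass computing the common range, then one segment per distinct endpoint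
--     first = list_of_data_indices[0]
--     start, end = first[0][0], first[-1][1]
--     for l in list_of_data_indices[1:]:
--         a, b = l[0][0], l[-1][1]
--         if a > start:
--             start = a
--         if b < end:
--             end = b
--     ends = sorted({e for l in list_of_data_indices for _, e in l if start <= e <= end})
--     return list(zip([start] + [e + 1 for e in ends], ends))
-- ===== Notes on version B (the rewrite author's own statement) =====
-- stated objective: alternative
-- what changed: B computes the common [start, end] range in one explicit accumulator pass, collects the interval endpoints inside it into a deduplicated sorted list, and builds the result by zipping the shifted endpoints with the endpoints, instead of A's scan of every index in the range with a nested break-on-match search over all intervals; asymptotically better when the index range is large, but not measurably faster on the generated inputs.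
import Mathlib
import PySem

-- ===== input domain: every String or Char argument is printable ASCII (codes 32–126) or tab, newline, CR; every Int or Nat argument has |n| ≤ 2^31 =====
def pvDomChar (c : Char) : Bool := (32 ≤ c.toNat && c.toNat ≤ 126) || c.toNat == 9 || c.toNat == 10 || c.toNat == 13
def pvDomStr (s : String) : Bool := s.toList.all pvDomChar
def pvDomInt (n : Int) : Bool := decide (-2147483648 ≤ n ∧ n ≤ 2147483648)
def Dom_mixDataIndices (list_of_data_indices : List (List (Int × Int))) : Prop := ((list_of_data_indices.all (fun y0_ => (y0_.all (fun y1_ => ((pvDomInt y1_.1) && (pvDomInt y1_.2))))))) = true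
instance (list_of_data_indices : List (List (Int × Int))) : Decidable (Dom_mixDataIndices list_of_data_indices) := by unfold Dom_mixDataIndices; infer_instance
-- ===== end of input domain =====

-- B computes the common range in one explicit pass, then emits one segment per sorted distinct
-- endpoint by zipping shifted endpoints, instead of A's scan of every index in the range with a
-- nested search over all intervals (objective: alternative).


-- ===== PORT A =====
-- start = max([x[0][0] ...]), end = min([x[-1][1] ...]); Pre_ guarantees the pyGet?/max?/min?
-- options are 'some', so the '.getD' defaults are never the value used.
-- The inner 'for l … for indices …, break on first match' search is ported as the
-- corresponding existence test 'any' (the break leaves no other state behind).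
def mixDataIndices (list_of_data_indices : List (List (Int × Int))) : List (Int × Int) :=
  let start := (PySem.List.max? (list_of_data_indices.map
      (fun x => ((PySem.List.pyGet? x 0).getD (0, 0)).1)) (fun v => v)).getD 0
  let end_ := (PySem.List.min? (list_of_data_indices.map
      (fun x => ((PySem.List.pyGet? x (-1)).getD (0, 0)).2)) (fun v => v)).getD 0
  ((PySem.List.pyRange start (end_ + 1) 1).foldl
    (fun (st : List (Int × Int) × Int) index =>
      if list_of_data_indices.any (fun l => l.any (fun indices => indices.2 == index)) then
        (st.1 ++ [(st.2, index)], index + 1)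
      else st)
    ([], start)).1

-- ===== PORT B =====
def mixDataIndices_alt (list_of_data_indices : List (List (Int × Int))) : List (Int × Int) :=
  let first := (PySem.List.pyGet? list_of_data_indices 0).getD []
  let se := (PySem.List.slice list_of_data_indices (some 1) none).foldl
    (fun (p : Int × Int) l =>
      let a := ((PySem.List.pyGet? l 0).getD (0, 0)).1
      let b := ((PySem.List.pyGet? l (-1)).getD (0, 0)).2
      (if a > p.1 then a else p.1, if b < p.2 then b else p.2))
    (((PySem.List.pyGet? first 0).getD (0, 0)).1,
     ((PySem.List.pyGet? first (-1)).getD (0, 0)).2)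
  let ends := PySem.List.sorted (PySem.Set.ofList
      ((list_of_data_indices.flatMap
        (fun l => l.filter (fun q => decide (se.1 ≤ q.2) && decide (q.2 ≤ se.2)))).map
        (fun q => q.2))) (fun v => v) false
  (se.1 :: ends.map (fun e => e + 1)).zip ends

-- ===== PRECONDITION & SPEC =====
-- Pre_ excludes exactly the inputs on which Python A raises: an empty outer list
-- (ValueError from max of an empty sequence) or any empty inner list (IndexError).
def Pre_mixDataIndices (list_of_data_indices : List (List (Int × Int))) : Prop :=
  list_of_data_indices ≠ [] ∧ ∀ l ∈ list_of_data_indices, l ≠ []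
instance (list_of_data_indices : List (List (Int × Int))) : Decidable (Pre_mixDataIndices list_of_data_indices) := by unfold Pre_mixDataIndices; infer_instance
def pvWitness_mixDataIndices : (List (List (Int × Int))) := [[(0, 2), (3, 4)], [(0, 4)]]
def Spec_mixDataIndices (list_of_data_indices : List (List (Int × Int))) (out : List (Int × Int)) : Prop := out = mixDataIndices_alt list_of_data_indices
instance (list_of_data_indices : List (List (Int × Int))) (out : List (Int × Int)) : Decidable (Spec_mixDataIndices list_of_data_indices out) := by unfold Spec_mixDataIndices; infer_instance

-- ===== CLAIM (what is proved, stated in full; the proofs are below) =====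
def Claim_equal_mixDataIndices : Prop := ∀ (list_of_data_indices : List (List (Int × Int))), Dom_mixDataIndices list_of_data_indices → Pre_mixDataIndices list_of_data_indices → Spec_mixDataIndices list_of_data_indices (mixDataIndices list_of_data_indices)

-- ===== LEMMAS AND PROOFS =====

-- B's single pass computing both extrema equals A's max of the starts / min of the ends.
theorem pv_pair_fold (f g : List (Int × Int) → Int) (t : List (List (Int × Int))) :
    ∀ s0 e0 : Int,
    t.foldl (fun (p : Int × Int) l =>
        (if f l > p.1 then f l else p.1, if g l < p.2 then g l else p.2)) (s0, e0)
      = ((t.map f).foldl max s0, (t.map g).foldl min e0) := by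
  induction t with
  | nil => intro s0 e0; rfl
  | cons x t ih =>
      intro s0 e0
      have h1 : (if f x > s0 then f x else s0) = max s0 (f x) := by split_ifs <;> omega
      have h2 : (if g x < e0 then g x else e0) = min e0 (g x) := by split_ifs <;> omega
      simp only [List.foldl_cons, List.map_cons, ih, h1, h2]

-- A's guarded fold over the index range is the plain fold over the indices passing the guard.
theorem pv_foldl_if_filter (p : Int → Bool) (rng : List Int) :
    ∀ st0 : List (Int × Int) × Int,
    rng.foldl (fun st index => if p index then (st.1 ++ [(st.2, index)], index + 1) else st) st0
      = (rng.filter p).foldl (fun st e => (st.1 ++ [(st.2, e)], e + 1)) st0 := by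
  induction rng with
  | nil => intro st0; rfl
  | cons x t ih =>
      intro st0
      by_cases hx : p x = true
      · simp [List.foldl_cons, hx, ih]
      · simp [List.foldl_cons, hx, ih]

-- The segment-emitting fold is B's zip of the shifted endpoints with the endpoints.
theorem pv_fold_eq_zip (ends : List Int) :
    ∀ (acc : List (Int × Int)) (cur : Int),
    (ends.foldl (fun (st : List (Int × Int) × Int) e => (st.1 ++ [(st.2, e)], e + 1)) (acc, cur)).1
      = acc ++ (cur :: ends.map (fun e => e + 1)).zip ends := by
  induction ends with
  | nil => intro acc cur; simp
  | cons x t ih => intro acc cur; simp [List.foldl_cons, ih]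

-- The indices in [start, end] hit by some interval endpoint, in increasing order,
-- are exactly B's sorted deduplicated endpoint list.
theorem pv_filter_range_eq_sorted (L : List (List (Int × Int))) (start end_ : Int) :
    (PySem.List.pyRange start (end_ + 1) 1).filter
        (fun index => L.any (fun l => l.any (fun indices => indices.2 == index)))
      = PySem.List.sorted (PySem.Set.ofList
          ((L.flatMap (fun l => l.filter
              (fun p => decide (start ≤ p.2) && decide (p.2 ≤ end_)))).map
            (fun p => p.2))) (fun v => v) false := by
  refine (PySem.List.sorted_eq_of_perm_of_pairwise_lt _ _ _ ?_ ?_).symm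
  · rw [List.perm_ext_iff_of_nodup
      (List.Nodup.filter _ (PySem.List.nodup_pyRange_one _ _)) (PySem.Set.nodup_ofList _)]
    intro x
    simp only [List.mem_filter, PySem.List.mem_pyRange_one, PySem.Set.mem_ofList,
      List.mem_map, List.mem_flatMap, List.any_eq_true, beq_iff_eq, Bool.and_eq_true,
      decide_eq_true_eq]
    constructor
    · rintro ⟨⟨h1, h2⟩, l, hl, q, hq, hqx⟩
      exact ⟨q, ⟨l, hl, hq, hqx ▸ ⟨h1, by omega⟩⟩, hqx⟩
    · rintro ⟨q, ⟨l, hl, hq, h1, h2⟩, hqx⟩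
      exact ⟨⟨hqx ▸ h1, by omega⟩, l, hl, q, hq, hqx⟩
  · exact List.Pairwise.filter _ (PySem.List.pairwise_lt_pyRange_one _ _)

-- ===== VERDICT (by name: the statement is the Claim_ definition above) =====
theorem mixDataIndices_spec : Claim_equal_mixDataIndices := by
  intro L _ pre
  obtain ⟨hne, -⟩ := pre
  obtain ⟨x, t, rfl⟩ := List.exists_cons_of_ne_nil hne
  have hfirst : PySem.List.pyGet? (x :: t) (0 : Int) = some x := by
    simp [PySem.List.pyGet?, PySem.List.pyIdx?]
  unfold Spec_mixDataIndices mixDataIndices mixDataIndices_alt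
  dsimp only
  rw [pv_foldl_if_filter, PySem.List.slice_from_one, List.tail_cons, pv_pair_fold]
  simp only [hfirst, Option.getD_some, List.map_cons, PySem.List.max?_id_cons,
    PySem.List.min?_id_cons]
  rw [pv_filter_range_eq_sorted, pv_fold_eq_zip]
  simp only [List.nil_append]
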